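-- pv_equiv track=rewrite | github.com/StigNorland/DynamicGraphMemory | src/generate_test_v3.py | pair_turns
-- ===== SOURCE A (Python) =====
-- def pair_turns(turns: list[tuple]) -> list[tuple[str, str]]:
--     """Group (user, assistant) into exchange pairs."""
--     pairs, i = [], 0
--     while i < len(turns):
--         role, text = turns[i]
--         if role == 'user':
--             asst = turns[i+1][1] if i+1 < len(turns) and turns[i+1][0] == 'assistant' else ''
--             pairs.append((text, asst))
--             i += 2 if asst else 1
--         else:
--             pairs.append(('', text))   # orphan assistant
--             i += 1
--     return pairs
-- ===== SOURCE B (Python) =====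
-- def pair_turns(turns: list[tuple]) -> list[tuple[str, str]]:
--     """Group (user, assistant) into exchange pairs: one forward pass with a
--     pending-user accumulator instead of index-based lookahead."""
--     pairs = []
--     pending = None
--     for role, text in turns:
--         if role == 'user':
--             if pending is not None:
--                 pairs.append((pending, ''))
--             pending = text
--         elif role == 'assistant':
--             if pending is not None:
--                 pairs.append((pending, text))
--             else:
--                 pairs.append(('', text))
--             pending = None
--         else:
--             if pending is not None:
--                 pairs.append((pending, ''))
--                 pending = None
--             pairs.append(('', text))
--     if pending is not None:
--         pairs.append((pending, ''))
--     return pairs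
-- ===== Notes on version B (the rewrite author's own statement) =====
-- stated objective: simpler
-- what changed: Replaced the index-based while loop with variable stride and lookahead by a single structural forward pass keeping a pending-user accumulator that is flushed on the next turn or at the end.
-- intended difference: On inputs containing a user turn immediately followed by an assistant turn with empty text, A's truthiness test makes it emit (user,'') plus a spurious orphan ('',''), while B emits the single pair (user,''); pairing the empty reply with its user is the intended grouping. — e.g. on pair_turns([("user", "a"), ("assistant", "")]): A returns [("a", ""), ("", "")], B returns [("a", "")]
import Mathlib
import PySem

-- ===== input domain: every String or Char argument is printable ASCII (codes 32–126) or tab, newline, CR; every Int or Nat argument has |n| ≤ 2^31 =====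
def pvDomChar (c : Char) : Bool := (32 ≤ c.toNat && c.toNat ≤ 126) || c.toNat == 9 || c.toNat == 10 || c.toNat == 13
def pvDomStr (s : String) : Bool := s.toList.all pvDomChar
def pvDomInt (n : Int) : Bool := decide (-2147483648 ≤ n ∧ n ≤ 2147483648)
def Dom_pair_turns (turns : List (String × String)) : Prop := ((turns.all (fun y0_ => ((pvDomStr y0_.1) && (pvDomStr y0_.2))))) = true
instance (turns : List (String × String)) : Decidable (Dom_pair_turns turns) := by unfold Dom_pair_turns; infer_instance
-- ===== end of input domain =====

-- B replaces A's index/lookahead while-loop by one forward pass with a pending-user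
-- accumulator (objective: simpler); on a user turn followed by an empty assistant
-- reply B emits one pair where A also emits a spurious ('','') orphan (see D_).

-- ===== PORT A =====
-- A's while loop over index i with lookahead at i+1, as structural recursion on the
-- suffix: 'i += 2' drops two elements, 'i += 1' drops one.
def pairTurnsGo : List (String × String) → List (String × String)
  | [] => []
  | (role, text) :: rest =>
    if role == "user" then
      match rest with
      | (r2, t2) :: rest2 =>
        let asst := if r2 == "assistant" then t2 else ""
        if asst ≠ "" then (text, asst) :: pairTurnsGo rest2   -- i += 2
        else (text, asst) :: pairTurnsGo ((r2, t2) :: rest2)  -- i += 1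
      | [] => [(text, "")]
    else ("", text) :: pairTurnsGo rest                        -- orphan assistant
termination_by l => l.length
decreasing_by all_goals simp

def pair_turns (turns : List (String × String)) : List (String × String) :=
  pairTurnsGo turns

-- ===== PORT B =====
-- one forward pass; pending : Option String is the not-yet-emitted user text
def pairTurnsAltGo : List (String × String) → Option String → List (String × String)
  | [], pending =>
    match pending with
    | some u => [(u, "")]
    | none => []
  | (role, text) :: rest, pending =>
    if role == "user" then
      match pending with
      | some u => (u, "") :: pairTurnsAltGo rest (some text)
      | none => pairTurnsAltGo rest (some text)
    else if role == "assistant" then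
      (match pending with
       | some u => (u, text)
       | none => ("", text)) :: pairTurnsAltGo rest none
    else
      match pending with
      | some u => (u, "") :: ("", text) :: pairTurnsAltGo rest none
      | none => ("", text) :: pairTurnsAltGo rest none

def pair_turns_alt (turns : List (String × String)) : List (String × String) :=
  pairTurnsAltGo turns none

-- ===== PRECONDITION & SPEC =====
-- On inputs containing a user turn immediately followed by an assistant turn with empty
-- text, A emits (user,'') plus a spurious orphan ('',''), while B emits the single pair
-- (user,''); pairing the empty reply with its user is the intended grouping.
def hasBadPair : List (String × String) → Bool
  | (r1, _) :: (r2, t2) :: rest =>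
    (r1 == "user" && r2 == "assistant" && t2 == "") || hasBadPair ((r2, t2) :: rest)
  | _ => false

def D_pair_turns (turns : List (String × String)) : Prop := hasBadPair turns = true
instance (turns : List (String × String)) : Decidable (D_pair_turns turns) := by
  unfold D_pair_turns; infer_instance

def Spec_pair_turns (turns : List (String × String)) (out : List (String × String)) : Prop :=
  ¬ D_pair_turns turns → out = pair_turns_alt turns
instance (turns : List (String × String)) (out : List (String × String)) : Decidable (Spec_pair_turns turns out) := by
  unfold Spec_pair_turns; infer_instance

def pvDiffWitness_pair_turns : (List (String × String)) := [("user", "a"), ("assistant", "")]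
def pvDiffWitnessOut_pair_turns : (List (String × String)) × (List (String × String)) :=
  ([("a", ""), ("", "")], [("a", "")])

-- ===== CLAIM (what is proved, stated in full; the proofs are below) =====
def Claim_unchanged_pair_turns : Prop := ∀ (turns : List (String × String)), Dom_pair_turns turns → Spec_pair_turns turns (pair_turns turns)
def Claim_changed_pair_turns : Prop := Dom_pair_turns (pvDiffWitness_pair_turns) ∧ D_pair_turns (pvDiffWitness_pair_turns) ∧ pair_turns (pvDiffWitness_pair_turns) = pvDiffWitnessOut_pair_turns.1 ∧ pair_turns_alt (pvDiffWitness_pair_turns) = pvDiffWitnessOut_pair_turns.2 ∧ pvDiffWitnessOut_pair_turns.1 ≠ pvDiffWitnessOut_pair_turns.2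
def Claim_exact_pair_turns : Prop := ∀ (turns : List (String × String)), Dom_pair_turns turns → D_pair_turns turns → pair_turns turns ≠ pair_turns_alt turns

-- ===== LEMMAS AND PROOFS =====

-- rewrite equations for A's port (well-founded definition, so stated explicitly)
theorem goA_nil : pairTurnsGo [] = [] := by
  unfold pairTurnsGo; rfl

theorem goA_orphan (role text : String) (rest : List (String × String)) (h : ¬ role = "user") :
    pairTurnsGo ((role, text) :: rest) = ("", text) :: pairTurnsGo rest := by
  rw [pairTurnsGo.eq_def]; simp [h]

theorem goA_user_last (text : String) : pairTurnsGo [("user", text)] = [(text, "")] := by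
  rw [pairTurnsGo.eq_def]; simp

theorem goA_user_pair (text t2 : String) (rest2 : List (String × String)) (h : ¬ t2 = "") :
    pairTurnsGo (("user", text) :: ("assistant", t2) :: rest2)
      = (text, t2) :: pairTurnsGo rest2 := by
  rw [pairTurnsGo.eq_def]; simp [h]

theorem goA_user_empty (text : String) (rest2 : List (String × String)) :
    pairTurnsGo (("user", text) :: ("assistant", "") :: rest2)
      = (text, "") :: ("", "") :: pairTurnsGo rest2 := by
  rw [pairTurnsGo.eq_def]
  simp
  rw [goA_orphan "assistant" "" rest2 (by decide)]

theorem goA_user_other (text r2 t2 : String) (rest2 : List (String × String)) (h : ¬ r2 = "assistant") :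
    pairTurnsGo (("user", text) :: (r2, t2) :: rest2)
      = (text, "") :: pairTurnsGo ((r2, t2) :: rest2) := by
  rw [pairTurnsGo.eq_def]; simp [h]

theorem hasBad_tail (a : String × String) (t : List (String × String))
    (h : hasBadPair (a :: t) = false) : hasBadPair t = false := by
  cases t with
  | nil => rfl
  | cons b t' =>
    obtain ⟨r2, t2⟩ := b
    obtain ⟨r1, t1⟩ := a
    simp only [hasBadPair, Bool.or_eq_false_iff] at h
    exact h.2

theorem hasBad_tail' (a : String × String) (t : List (String × String))
    (h : hasBadPair (a :: t) = true)
    (hnot : ¬ (a.1 = "user" ∧ (∃ r, t = ("assistant", "") :: r))) :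
    hasBadPair t = true := by
  cases t with
  | nil => obtain ⟨r1, t1⟩ := a; simp [hasBadPair] at h
  | cons b t' =>
    obtain ⟨r2, t2⟩ := b
    obtain ⟨r1, t1⟩ := a
    simp only [hasBadPair, Bool.or_eq_true] at h
    rcases h with h | h
    · exfalso
      apply hnot
      simp only [Bool.and_eq_true, beq_iff_eq] at h
      exact ⟨h.1.1, t', by rw [h.1.2, h.2]⟩
    · exact h

theorem key : ∀ (n : Nat) (l : List (String × String)), l.length ≤ n →
    hasBadPair l = false → pairTurnsGo l = pairTurnsAltGo l none := by
  intro n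
  induction n with
  | zero =>
    intro l hl _
    have : l = [] := List.eq_nil_of_length_eq_zero (Nat.le_zero.mp hl)
    subst this
    simp [goA_nil, pairTurnsAltGo]
  | succ n ih =>
    intro l hl hb
    cases l with
    | nil => simp [goA_nil, pairTurnsAltGo]
    | cons hd rest =>
      obtain ⟨role, text⟩ := hd
      by_cases hu : role = "user"
      · subst hu
        cases rest with
        | nil => simp [goA_user_last, pairTurnsAltGo]
        | cons hd2 rest2 =>
          obtain ⟨r2, t2⟩ := hd2
          have hrest : hasBadPair ((r2, t2) :: rest2) = false := hasBad_tail _ _ hb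
          have hrest2 : hasBadPair rest2 = false := hasBad_tail _ _ hrest
          have hl1 : ((r2, t2) :: rest2).length ≤ n := by
            simpa using Nat.le_of_succ_le_succ hl
          have hl2 : rest2.length ≤ n := le_trans (by simp) hl1
          by_cases ha : r2 = "assistant"
          · subst ha
            by_cases ht2 : t2 = ""
            · exfalso; subst ht2; simp [hasBadPair] at hb
            · rw [goA_user_pair text t2 rest2 ht2]
              simp [pairTurnsAltGo, ih rest2 hl2 hrest2]
          · rw [goA_user_other text r2 t2 rest2 ha, ih _ hl1 hrest]
            by_cases hu2 : r2 = "user"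
            · subst hu2; simp [pairTurnsAltGo]
            · simp [pairTurnsAltGo, ha, hu2]
      · have hrest : hasBadPair rest = false := hasBad_tail _ _ hb
        have hl1 : rest.length ≤ n := Nat.le_of_succ_le_succ hl
        rw [goA_orphan role text rest hu, ih rest hl1 hrest]
        by_cases ha : role = "assistant" <;> simp [pairTurnsAltGo, hu, ha]

theorem alt_len_orphan (role text : String) (rest : List (String × String)) (h : ¬ role = "user") :
    (pairTurnsAltGo ((role, text) :: rest) none).length = 1 + (pairTurnsAltGo rest none).length := by
  by_cases ha : role = "assistant" <;> simp [pairTurnsAltGo, h, ha] <;> omega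

theorem len_le : ∀ (n : Nat) (l : List (String × String)), l.length ≤ n →
    (pairTurnsAltGo l none).length ≤ (pairTurnsGo l).length := by
  intro n
  induction n with
  | zero =>
    intro l hl
    have : l = [] := List.eq_nil_of_length_eq_zero (Nat.le_zero.mp hl)
    subst this; simp [goA_nil, pairTurnsAltGo]
  | succ n ih =>
    intro l hl
    cases l with
    | nil => simp [goA_nil, pairTurnsAltGo]
    | cons hd rest =>
      obtain ⟨role, text⟩ := hd
      by_cases hu : role = "user"
      · subst hu
        cases rest with
        | nil => simp [goA_user_last, pairTurnsAltGo]
        | cons hd2 rest2 =>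
          obtain ⟨r2, t2⟩ := hd2
          have hl1 : ((r2, t2) :: rest2).length ≤ n := by
            simpa using Nat.le_of_succ_le_succ hl
          have hl2 : rest2.length ≤ n := le_trans (by simp) hl1
          by_cases ha : r2 = "assistant"
          · subst ha
            by_cases ht2 : t2 = ""
            · subst ht2
              have := ih rest2 hl2
              rw [goA_user_empty]
              simp [pairTurnsAltGo]
              omega
            · have := ih rest2 hl2
              rw [goA_user_pair text t2 rest2 ht2]
              simp [pairTurnsAltGo]
              omega
          · rw [goA_user_other text r2 t2 rest2 ha]
            have := ih _ hl1
            by_cases hu2 : r2 = "user"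
            · subst hu2
              simp only [pairTurnsAltGo] at this ⊢
              simp at this ⊢
              omega
            · have := ih rest2 hl2
              rw [goA_orphan r2 t2 rest2 hu2]
              simp [pairTurnsAltGo, ha, hu2]
              omega
      · have := ih rest (Nat.le_of_succ_le_succ hl)
        rw [goA_orphan role text rest hu]
        by_cases ha : role = "assistant" <;> simp [pairTurnsAltGo, hu, ha] <;> omega

theorem len_lt : ∀ (n : Nat) (l : List (String × String)), l.length ≤ n →
    hasBadPair l = true → (pairTurnsAltGo l none).length < (pairTurnsGo l).length := by
  intro n
  induction n with
  | zero =>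
    intro l hl hb
    have : l = [] := List.eq_nil_of_length_eq_zero (Nat.le_zero.mp hl)
    subst this; simp [hasBadPair] at hb
  | succ n ih =>
    intro l hl hb
    cases l with
    | nil => simp [hasBadPair] at hb
    | cons hd rest =>
      obtain ⟨role, text⟩ := hd
      cases rest with
      | nil => simp [hasBadPair] at hb
      | cons hd2 rest2 =>
        obtain ⟨r2, t2⟩ := hd2
        have hl1 : ((r2, t2) :: rest2).length ≤ n := by
          simpa using Nat.le_of_succ_le_succ hl
        have hl2 : rest2.length ≤ n := le_trans (by simp) hl1
        by_cases hu : role = "user"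
        · subst hu
          by_cases ha : r2 = "assistant"
          · subst ha
            by_cases ht2 : t2 = ""
            · -- the bad pair itself: A emits two pairs here, B one
              subst ht2
              have := len_le n rest2 hl2
              rw [goA_user_empty]
              simp [pairTurnsAltGo]
              omega
            · have hbr2 : hasBadPair rest2 = true := by
                have h1 : hasBadPair (("assistant", t2) :: rest2) = true :=
                  hasBad_tail' _ _ hb (by
                    rintro ⟨-, r, hr⟩
                    injection hr with h1 h2
                    exact ht2 (congrArg Prod.snd h1))
                exact hasBad_tail' _ _ h1 (by rintro ⟨h, -⟩; simp at h)
              have := ih rest2 hl2 hbr2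
              rw [goA_user_pair text t2 rest2 ht2]
              simp [pairTurnsAltGo]
              omega
          · have hbr : hasBadPair ((r2, t2) :: rest2) = true :=
              hasBad_tail' _ _ hb (by rintro ⟨-, r, hr⟩; injection hr with h1 h2; exact ha (congrArg Prod.fst h1))
            have := ih _ hl1 hbr
            rw [goA_user_other text r2 t2 rest2 ha]
            by_cases hu2 : r2 = "user"
            · subst hu2
              simp only [pairTurnsAltGo] at this ⊢
              simp at this ⊢
              omega
            · have hbr2 : hasBadPair rest2 = true :=
                hasBad_tail' _ _ hbr (by rintro ⟨h, -⟩; exact hu2 h)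
              have := ih rest2 hl2 hbr2
              rw [goA_orphan r2 t2 rest2 hu2]
              simp [pairTurnsAltGo, ha, hu2]
              omega
        · have hbr : hasBadPair ((r2, t2) :: rest2) = true :=
            hasBad_tail' _ _ hb (by rintro ⟨h, -⟩; exact hu h)
          have := ih _ hl1 hbr
          rw [goA_orphan role text ((r2, t2) :: rest2) hu,
            alt_len_orphan role text ((r2, t2) :: rest2) hu]
          simp only [List.length_cons]
          omega

-- ===== VERDICT (by name: the statement is the Claim_ definition above) =====
theorem pair_turns_spec : Claim_unchanged_pair_turns := by
  intro turns _ hD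
  have hb : hasBadPair turns = false := by
    unfold D_pair_turns at hD
    exact Bool.not_eq_true _ ▸ (by simpa using hD)
  unfold pair_turns pair_turns_alt
  exact key turns.length turns le_rfl hb

theorem pair_turns_changed : Claim_changed_pair_turns := by
  unfold Claim_changed_pair_turns
  refine ⟨by decide, by decide, ?_, by decide, by decide⟩
  unfold pair_turns pvDiffWitness_pair_turns pvDiffWitnessOut_pair_turns
  rw [goA_user_empty, goA_nil]

theorem pair_turns_tight : Claim_exact_pair_turns := by
  intro turns _ hD heq
  have := len_lt turns.length turns le_rfl hD
  unfold pair_turns pair_turns_alt at heq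
  rw [heq] at this
  exact lt_irrefl _ this
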